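-- pv_equiv track=rewrite | github.com/nickcdryan/textevolve | scripts/current_script_19.py | generate_candidate_slots
-- ===== SOURCE A (Python) =====
-- def generate_candidate_slots(work_hours, duration):
--     """Generates candidate time slots based on the work hours and duration."""
--     start_hour, end_hour = work_hours
--     slots = []
--     for hour in range(start_hour, end_hour):
--         for minute in range(0, 60, 30):
--             start = hour * 60 + minute
--             end = start + duration
--             if end <= end_hour * 60:
--                 slots.append((hour, minute, end // 60, end % 60))
--     return slots
-- ===== SOURCE B (Python) =====
-- def _hour_minute(t):
--     """Splits an absolute minute of the day into an (hour, minute) pair."""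
--     return (t // 60, t % 60)
--
-- def _end_time(hour, minute, duration):
--     """End time of the slot starting at hour:minute, as an (hour, minute) pair."""
--     return _hour_minute(hour * 60 + minute + duration)
--
-- def _slot(hour, minute, duration):
--     """The slot tuple for the candidate starting at hour:minute."""
--     end_h, end_m = _end_time(hour, minute, duration)
--     return (hour, minute, end_h, end_m)
--
-- def generate_candidate_slots(work_hours, duration):
--     """Generates candidate time slots based on the work hours and duration."""
--     start_hour, end_hour = work_hours
--     # closed-form count of candidate starts whose slot fits: start + duration <= end_hour*60,
--     # capped by the total number of half-hour starts inside the work hours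
--     fit = (60 * (end_hour - start_hour) - duration) // 30 + 1
--     n = min(2 * (end_hour - start_hour), fit)
--     if n <= 0:
--         return []
--     slots = [None] * n
--     for k in range(n):
--         whole_hours, half = divmod(k, 2)
--         slots[k] = _slot(start_hour + whole_hours, 30 * half, duration)
--     return slots
-- ===== Notes on version B (the rewrite author's own statement) =====
-- stated objective: alternative
-- what changed: Instead of nested hour/minute loops testing each candidate against the end bound, B computes the number of fitting slots in closed form ((60*(end-start)-duration)//30+1, capped by the number of half-hour starts), preallocates the output, and fills slot k directly from divmod(k,2) via small time-conversion helpers, with no per-slot guard.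
import Mathlib
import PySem

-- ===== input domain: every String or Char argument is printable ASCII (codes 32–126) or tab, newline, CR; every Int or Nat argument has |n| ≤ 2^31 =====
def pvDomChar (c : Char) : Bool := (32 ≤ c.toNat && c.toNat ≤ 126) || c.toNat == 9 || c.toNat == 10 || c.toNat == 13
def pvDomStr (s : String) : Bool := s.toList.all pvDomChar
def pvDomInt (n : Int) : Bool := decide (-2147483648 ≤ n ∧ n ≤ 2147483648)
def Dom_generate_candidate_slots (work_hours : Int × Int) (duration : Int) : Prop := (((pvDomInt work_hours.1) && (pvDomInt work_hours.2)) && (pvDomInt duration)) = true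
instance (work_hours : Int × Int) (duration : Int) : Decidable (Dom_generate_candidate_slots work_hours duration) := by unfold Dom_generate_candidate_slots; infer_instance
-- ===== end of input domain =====

-- B replaces A's nested loops with a per-slot fit test by a closed-form count of the fitting
-- slots, then fills a preallocated list, deriving slot k's fields from divmod(k, 2) (alternative).

-- ===== PORT A =====
def generate_candidate_slots (work_hours : Int × Int) (duration : Int) : List (Int × Int × Int × Int) :=
  let start_hour := work_hours.1
  let end_hour := work_hours.2
  (PySem.List.pyRange start_hour end_hour 1).foldl
    (fun slots hour =>
      (PySem.List.pyRange 0 60 30).foldl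
        (fun slots minute =>
          let start := hour * 60 + minute
          let stop := start + duration
          if stop ≤ end_hour * 60 then
            slots ++ [(hour, minute, PySem.Int.floordiv stop 60, PySem.Int.mod stop 60)]
          else slots)
        slots)
    []

-- ===== PORT B =====
def pvHourMinute (t : Int) : Int × Int :=
  (PySem.Int.floordiv t 60, PySem.Int.mod t 60)

def pvEndTime (hour minute duration : Int) : Int × Int :=
  pvHourMinute (hour * 60 + minute + duration)

def pvSlotB (hour minute duration : Int) : Int × Int × Int × Int :=
  let e := pvEndTime hour minute duration
  (hour, minute, e.1, e.2)

def generate_candidate_slots_alt (work_hours : Int × Int) (duration : Int) : List (Int × Int × Int × Int) :=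
  let start_hour := work_hours.1
  let end_hour := work_hours.2
  let fit := PySem.Int.floordiv (60 * (end_hour - start_hour) - duration) 30 + 1
  let n := min (2 * (end_hour - start_hour)) fit
  if n ≤ 0 then []
  else
    -- slots = [None] * n; slots[k] = _slot(...) for each k: a map over the index range
    (PySem.List.pyRange 0 n 1).map (fun k =>
      let whole_hours := PySem.Int.floordiv k 2
      let half := PySem.Int.mod k 2
      pvSlotB (start_hour + whole_hours) (30 * half) duration)

-- ===== PRECONDITION & SPEC =====
def Spec_generate_candidate_slots (work_hours : Int × Int) (duration : Int) (out : List (Int × Int × Int × Int)) : Prop := out = generate_candidate_slots_alt work_hours duration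
instance (work_hours : Int × Int) (duration : Int) (out : List (Int × Int × Int × Int)) : Decidable (Spec_generate_candidate_slots work_hours duration out) := by unfold Spec_generate_candidate_slots; infer_instance

-- ===== CLAIM (what is proved, stated in full; the proofs are below) =====
def Claim_equal_generate_candidate_slots : Prop := ∀ (work_hours : Int × Int) (duration : Int), Dom_generate_candidate_slots work_hours duration → Spec_generate_candidate_slots work_hours duration (generate_candidate_slots work_hours duration)

-- ===== LEMMAS AND PROOFS =====

-- the tuple both programs build for an absolute start minute
def pvSlot (d start : Int) : Int × Int × Int × Int :=
  (PySem.Int.floordiv start 60, PySem.Int.mod start 60,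
   PySem.Int.floordiv (start + d) 60, PySem.Int.mod (start + d) 60)

-- floor-division / modulo facts for starts of the form h*60 and h*60+30
theorem pv_fd_mul (h : Int) : PySem.Int.floordiv (h * 60) 60 = h := by
  simp only [PySem.Int.floordiv, Int.fdiv_eq_ediv]; omega

theorem pv_md_mul (h : Int) : PySem.Int.mod (h * 60) 60 = 0 := by
  simp only [PySem.Int.mod, Int.fmod_eq_emod]; omega

theorem pv_fd_mul30 (h : Int) : PySem.Int.floordiv (h * 60 + 30) 60 = h := by
  simp only [PySem.Int.floordiv, Int.fdiv_eq_ediv]; omega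

theorem pv_md_mul30 (h : Int) : PySem.Int.mod (h * 60 + 30) 60 = 30 := by
  simp only [PySem.Int.mod, Int.fmod_eq_emod]; omega

-- a range counted by 30 from s*60 over 2m steps, as a map over List.range
theorem pv_range_aux (c : Int) (m : Nat) :
    List.map (fun k : Nat => c * 60 + 30 * (k : Int)) (List.range (2 * m)) =
      List.flatMap (fun h => [h * 60, h * 60 + 30]) (List.map (fun k : Nat => c + (k : Int)) (List.range m)) := by
  induction m with
  | zero => simp
  | succ n ih =>
    have h2 : 2 * (n + 1) = (2 * n + 1) + 1 := by ring
    rw [h2, List.range_succ, List.range_succ, List.range_succ]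
    simp only [List.map_append, List.flatMap_append, ih]
    simp only [List.map_cons, List.map_nil, List.flatMap_cons, List.flatMap_nil]
    push_cast
    rw [List.append_assoc]
    congr 1
    have e1 : c * 60 + 30 * (2 * (n : Int)) = (c + n) * 60 := by ring
    have e2 : c * 60 + 30 * (2 * (n : Int) + 1) = (c + n) * 60 + 30 := by ring
    simp [e1, e2]

-- the hour range expanded into half-hour absolute starts
theorem pv_range_flat (s e : Int) :
    List.map (fun k : Nat => s * 60 + 30 * (k : Int)) (List.range (2 * (e - s)).toNat) =
      List.flatMap (fun h => [h * 60, h * 60 + 30]) (PySem.List.pyRange s e 1) := by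
  rw [PySem.List.pyRange_one]
  have h2 : (2 * (e - s)).toNat = 2 * (e - s).toNat := by omega
  rw [h2]
  exact pv_range_aux s (e - s).toNat

-- A as a map over the filtered List.range of half-hour indices
theorem pv_A_canon (s e d : Int) :
    generate_candidate_slots (s, e) d =
      List.map (pvSlot d)
        (List.filter (fun start => decide (start + d ≤ e * 60))
          (List.map (fun k : Nat => s * 60 + 30 * (k : Int)) (List.range (2 * (e - s)).toNat))) := by
  simp only [generate_candidate_slots]
  rw [PySem.List.foldl_congr_mem _ _
        (fun slots hour => slots ++
          List.map (fun minute => (hour, minute, PySem.Int.floordiv (hour * 60 + minute + d) 60,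
                                   PySem.Int.mod (hour * 60 + minute + d) 60))
            (List.filter (fun minute => decide (hour * 60 + minute + d ≤ e * 60))
              (PySem.List.pyRange 0 60 30))) []
        (fun acc x _ => PySem.List.foldl_append_ite
          (p := fun minute => x * 60 + minute + d ≤ e * 60)
          (f := fun minute => (x, minute, PySem.Int.floordiv (x * 60 + minute + d) 60,
                               PySem.Int.mod (x * 60 + minute + d) 60)) _ acc)]
  rw [PySem.List.foldl_append_eq_flatMap]
  rw [pv_range_flat, List.filter_flatMap, List.map_flatMap]
  simp only [List.nil_append]
  refine List.flatMap_congr ?_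
  intro h _
  have h30 : PySem.List.pyRange 0 60 30 = [0, 30] := by decide
  rw [h30]
  simp only [List.filter_cons, List.filter_nil, decide_eq_true_eq]
  by_cases h1 : h * 60 + d ≤ e * 60
  · rw [if_pos (by omega : h * 60 + 0 + d ≤ e * 60), if_pos (by omega : h * 60 + d ≤ e * 60)]
    by_cases h2 : h * 60 + 30 + d ≤ e * 60
    · rw [if_pos h2, if_pos h2]
      simp only [List.map_cons, List.map_nil, pvSlot, pv_fd_mul, pv_md_mul, pv_fd_mul30, pv_md_mul30]
      have : h * 60 + 0 + d = h * 60 + d := by ring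
      rw [this]
    · rw [if_neg h2, if_neg h2]
      simp only [List.map_cons, List.map_nil, pvSlot, pv_fd_mul, pv_md_mul]
      have : h * 60 + 0 + d = h * 60 + d := by ring
      rw [this]
  · rw [if_neg (by omega : ¬ h * 60 + 0 + d ≤ e * 60), if_neg (by omega : ¬ h * 60 + d ≤ e * 60)]
    by_cases h2 : h * 60 + 30 + d ≤ e * 60
    · rw [if_pos h2, if_pos h2]
      simp only [List.map_cons, List.map_nil, pvSlot, pv_fd_mul30, pv_md_mul30]
    · rw [if_neg h2, if_neg h2]
      simp

-- filtering the range of indices by a 'k < N' predicate is truncation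
theorem pv_filter_range (P : Nat → Bool) (N : Nat) (hP : ∀ k, P k = decide (k < N)) (M : Nat) :
    List.filter P (List.range M) = List.range (min M N) := by
  induction M with
  | zero => simp
  | succ m ih =>
    rw [List.range_succ, List.filter_append, ih, List.filter_cons, List.filter_nil, hP]
    by_cases h : m < N
    · rw [if_pos (by simpa using h)]
      have hm : min (m + 1) N = min m N + 1 := by omega
      have hm2 : min m N = m := by omega
      rw [hm, hm2, List.range_succ]
    · rw [if_neg (by simpa using h)]
      have : min (m + 1) N = min m N := by omega
      rw [this, List.append_nil]

-- the fit test is 'k < fit' with fit the closed-form count B computes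
theorem pv_pred_eq (s e d : Int) (k : Nat) :
    decide (s * 60 + 30 * (k : Int) + d ≤ e * 60) =
      decide (k < (PySem.Int.floordiv (60 * (e - s) - d) 30 + 1).toNat) := by
  simp only [PySem.Int.floordiv, Int.fdiv_eq_ediv, decide_eq_decide]
  omega

-- slot k of B equals the slot both programs build for absolute start minute s*60 + 30*k
theorem pv_slotB_eq (s d k : Int) :
    pvSlotB (s + PySem.Int.floordiv k 2) (30 * PySem.Int.mod k 2) d = pvSlot d (s * 60 + 30 * k) := by
  have c1 : PySem.Int.floordiv (s * 60 + 30 * k) 60 = s + PySem.Int.floordiv k 2 := by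
    simp only [PySem.Int.floordiv, Int.fdiv_eq_ediv]; omega
  have c2 : PySem.Int.mod (s * 60 + 30 * k) 60 = 30 * PySem.Int.mod k 2 := by
    simp only [PySem.Int.mod, Int.fmod_eq_emod]; omega
  have h1 : (s + PySem.Int.floordiv k 2) * 60 + 30 * PySem.Int.mod k 2 + d = s * 60 + 30 * k + d := by
    simp only [PySem.Int.floordiv, PySem.Int.mod, Int.fdiv_eq_ediv, Int.fmod_eq_emod]; omega
  simp only [pvSlotB, pvEndTime, pvHourMinute, pvSlot, h1, c1, c2]

-- B as a map over the truncated range of indices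
theorem pv_B_canon (s e d : Int) :
    generate_candidate_slots_alt (s, e) d =
      List.map (fun k : Nat => pvSlot d (s * 60 + 30 * (k : Int)))
        (List.range (min (2 * (e - s)).toNat (PySem.Int.floordiv (60 * (e - s) - d) 30 + 1).toNat)) := by
  simp only [generate_candidate_slots_alt]
  set fit := PySem.Int.floordiv (60 * (e - s) - d) 30 + 1 with hfit
  by_cases h1 : min (2 * (e - s)) fit ≤ 0
  · rw [if_pos h1]
    have : min (2 * (e - s)).toNat fit.toNat = 0 := by omega
    simp [this]
  · rw [if_neg h1, PySem.List.pyRange_one]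
    have hn : (min (2 * (e - s)) fit - 0).toNat = min (2 * (e - s)).toNat fit.toNat := by omega
    rw [hn, List.map_map]
    refine List.map_congr_left ?_
    intro k _
    simp only [Function.comp_apply]
    rw [show ((0 : Int) + (k : Int)) = (k : Int) by ring]
    exact pv_slotB_eq s d (k : Int)

-- ===== VERDICT (by name: the statement is the Claim_ definition above) =====
theorem generate_candidate_slots_spec : Claim_equal_generate_candidate_slots := by
  intro work_hours d _
  unfold Spec_generate_candidate_slots
  obtain ⟨s, e⟩ := work_hours
  rw [pv_A_canon, pv_B_canon, List.filter_map,
      pv_filter_range _ _ (fun k => by simp only [Function.comp_apply]; exact pv_pred_eq s e d k),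
      List.map_map]
  exact List.map_congr_left (fun k _ => rfl)
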